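-- pv_equiv track=rewrite | github.com/therealkraus/learning | python/labs109.py | to_ordinal
-- ===== SOURCE A (Python) =====
-- def to_ordinal(seq):
--     seq_count = {}
--     ordinal_transformed = []
--     for s in seq:
--         seq_count.setdefault(s, 0)
--         seq_count[s] += 1
--         ordinal_transformed.append(seq_count[s])
--     return ordinal_transformed
-- ===== SOURCE B (Python) =====
-- def to_ordinal(seq):
--     lst = list(seq)
--     return [lst[:i + 1].count(lst[i]) for i in range(len(lst))]
-- ===== Notes on version B (the rewrite author's own statement) =====
-- stated objective: idiomatic
-- what changed: Replaces the maintained running-count dict with a per-index prefix rescan: each output is computed as lst[:i+1].count(lst[i]), no state carried between iterations.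
import Mathlib
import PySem

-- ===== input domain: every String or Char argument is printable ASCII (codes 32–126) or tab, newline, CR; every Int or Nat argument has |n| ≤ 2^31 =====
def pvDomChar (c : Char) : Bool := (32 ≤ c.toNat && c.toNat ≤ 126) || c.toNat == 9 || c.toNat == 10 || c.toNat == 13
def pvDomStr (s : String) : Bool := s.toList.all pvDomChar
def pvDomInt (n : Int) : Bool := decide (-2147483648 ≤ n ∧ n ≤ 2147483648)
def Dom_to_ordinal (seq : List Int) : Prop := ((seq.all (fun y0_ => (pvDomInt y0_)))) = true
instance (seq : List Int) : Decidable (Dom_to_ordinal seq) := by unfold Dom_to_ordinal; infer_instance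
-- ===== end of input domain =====

-- B replaces A's maintained running-count dict by an independent prefix rescan per index (idiomatic one-liner; same result, quadratic instead of linear).

-- ===== PORT A =====
-- A: one pass maintaining a counter dict, appending the updated count of each element.
def to_ordinal (seq : List Int) : List Int :=
  (seq.foldl
    (fun st s =>
      let d0 := st.1.setdefault s 0          -- seq_count.setdefault(s, 0)
      let d1 := d0.modify s 0 (fun x => x + 1)  -- seq_count[s] += 1
      (d1, st.2 ++ [d1.getD s 0]))           -- append(seq_count[s])
    ((PySem.Dict.empty : PySem.Dict Int Int), ([] : List Int))).2

-- ===== PORT B =====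
-- B: [lst[:i+1].count(lst[i]) for i in range(len(lst))]
def to_ordinal_alt (seq : List Int) : List Int :=
  (PySem.List.pyRange 0 (seq.length : Int) 1).map
    (fun i => ((PySem.List.slice seq none (some (i + 1))).count (PySem.List.pyGetD seq i 0) : Int))

-- ===== PRECONDITION & SPEC =====
def Spec_to_ordinal (seq : List Int) (out : List Int) : Prop := out = to_ordinal_alt seq
instance (seq : List Int) (out : List Int) : Decidable (Spec_to_ordinal seq out) := by unfold Spec_to_ordinal; infer_instance

-- ===== CLAIM (what is proved, stated in full; the proofs are below) =====
def Claim_equal_to_ordinal : Prop := ∀ (seq : List Int), Dom_to_ordinal seq → Spec_to_ordinal seq (to_ordinal seq)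

-- ===== LEMMAS AND PROOFS =====

-- The common value: running occurrence counts of `rest`, given the already-seen prefix `pre`.
def runCounts (pre rest : List Int) : List Int :=
  match rest with
  | [] => []
  | s :: t => ((pre.count s : Int) + 1) :: runCounts (pre ++ [s]) t

-- A's per-element dict update, characterised on lookups.
lemma stepD (d : PySem.Dict Int Int) (s v : Int) :
    ((d.setdefault s 0).modify s 0 (fun x => x + 1)).getD v 0 =
      if v = s then d.getD v 0 + 1 else d.getD v 0 := by
  have hsd : ∀ w, (d.setdefault s 0).getD w 0 = d.getD w 0 := by
    intro w
    by_cases h : d.contains s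
    · rw [PySem.Dict.setdefault_of_contains d 0 h]
    · rw [PySem.Dict.setdefault_of_not_contains d 0 (by simpa using h)]
      rcases eq_or_ne w s with rfl | hw
      · rw [PySem.Dict.getD_insert_self,
          PySem.Dict.getD_of_not_contains d 0 (by simpa using h)]
      · rw [PySem.Dict.getD_insert_of_ne _ _ _ hw]
  rw [PySem.Dict.getD_modify, hsd s, hsd v]
  split_ifs with h
  · rw [h]
  · rfl

-- A's loop invariant: with a dict holding exactly the counts of `pre`, the loop on `rest` appends runCounts pre rest.
lemma loopA (rest : List Int) : ∀ (pre : List Int) (d : PySem.Dict Int Int) (acc : List Int),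
    (∀ v, d.getD v 0 = (pre.count v : Int)) →
    (rest.foldl
      (fun st s =>
        let d0 := st.1.setdefault s 0
        let d1 := d0.modify s 0 (fun x => x + 1)
        (d1, st.2 ++ [d1.getD s 0]))
      (d, acc)).2 = acc ++ runCounts pre rest := by
  induction rest with
  | nil => intro pre d acc _; simp [runCounts]
  | cons s t ih =>
    intro pre d acc hinv
    simp only [List.foldl_cons]
    have hstep := stepD d s
    have hinv' : ∀ v, ((d.setdefault s 0).modify s 0 (fun x => x + 1)).getD v 0 =
        ((pre ++ [s]).count v : Int) := by
      intro v
      rw [hstep v, List.count_append]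
      rcases eq_or_ne v s with rfl | hv
      · simp [hinv v]
      · simp [hinv v, hv, Ne.symm hv]
    rw [ih (pre ++ [s]) _ _ hinv', hstep s, hinv s]
    simp [runCounts, List.append_assoc]

-- B equals runCounts, generalised over the seen prefix.
lemma altGen (rest : List Int) : ∀ (pre : List Int),
    (List.range rest.length).map
      (fun k => (((pre ++ rest).take (pre.length + k + 1)).count ((pre ++ rest).getD (pre.length + k) 0) : Int))
      = runCounts pre rest := by
  induction rest with
  | nil => intro pre; simp [runCounts]
  | cons s t ih =>
    intro pre
    simp only [List.length_cons]
    rw [List.range_succ_eq_map, List.map_cons, List.map_map, runCounts]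
    congr 1
    · have h1 : (pre ++ s :: t).take (pre.length + 0 + 1) = pre ++ [s] := by
        rw [Nat.add_zero]
        simp [List.take_append]
      have h2 : (pre ++ s :: t).getD (pre.length + 0) 0 = s := by
        simp [List.getD]
      rw [h1, h2, List.count_append]
      simp
    · rw [← ih (pre ++ [s])]
      apply List.map_congr_left
      intro k _
      have e1 : pre ++ s :: t = (pre ++ [s]) ++ t := by simp
      have e2 : pre.length + Nat.succ k = (pre ++ [s]).length + k := by
        simp [Nat.succ_eq_add_one]; omega
      simp only [Function.comp, e1, e2]

lemma alt_eq_runCounts (seq : List Int) : to_ordinal_alt seq = runCounts [] seq := by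
  unfold to_ordinal_alt
  rw [PySem.List.pyRange_one, List.map_map, ← altGen seq []]
  apply List.map_congr_left
  intro k hk
  have hk' : k < seq.length := by simpa using hk
  have hz : (0 : Int) + (k : Int) = ((k : Nat) : Int) := by ring
  have hone : ((k : Int) + 1) = (((k + 1 : Nat)) : Int) := by push_cast; ring
  simp only [Function.comp, hz, hone, PySem.List.slice_to_natCast, PySem.List.pyGetD_natCast]
  simp [List.getD]

-- ===== VERDICT (by name: the statement is the Claim_ definition above) =====
theorem to_ordinal_spec : Claim_equal_to_ordinal := by
  intro seq _
  show to_ordinal seq = to_ordinal_alt seq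
  rw [alt_eq_runCounts]
  unfold to_ordinal
  exact loopA seq [] PySem.Dict.empty []
    (by intro v; simp [PySem.Dict.getD_empty])
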